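-- pv_equiv track=rewrite | github.com/ZetsubouCode/BatchBench | utils/parse.py | parse_tag_list
-- ===== SOURCE A (Python) =====
-- from typing import Any, List, Optional
--
-- def _chunks(raw: Any) -> List[str]:
--     if raw is None:
--         return []
--     if isinstance(raw, list):
--         return [str(x) for x in raw]
--     return [str(raw)]
--
-- def parse_tag_list(raw: Any, dedupe: bool = False) -> List[str]:
--     out: List[str] = []
--     seen = set()
--     for chunk in _chunks(raw):
--         for line in chunk.replace("\r", "\n").split("\n"):
--             for token in line.split(","):
--                 value = token.strip()
--                 if not value:
--                     continue
--                 if dedupe: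
--                     if value in seen:
--                         continue
--                     seen.add(value)
--                 out.append(value)
--     return out
-- ===== SOURCE B (Python) =====
-- from typing import Any, List
--
-- def _chunks(raw: Any) -> List[str]:
--     if raw is None:
--         return []
--     if isinstance(raw, list):
--         return [str(x) for x in raw]
--     return [str(raw)]
--
-- def _tokens(chunk: str) -> List[str]:
--     # one character-level scan: split on ',', '\r' or '\n' in a single pass
--     toks: List[str] = []
--     buf: List[str] = []
--     for ch in chunk:
--         if ch in ",\r\n":
--             toks.append("".join(buf))
--             buf = []
--         else:
--             buf.append(ch)
--     toks.append("".join(buf))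
--     return toks
--
-- def parse_tag_list(raw: Any, dedupe: bool = False) -> List[str]:
--     out: List[str] = []
--     seen = set()
--     for chunk in _chunks(raw):
--         for token in _tokens(chunk):
--             value = token.strip()
--             if not value:
--                 continue
--             if dedupe:
--                 if value in seen:
--                     continue
--                 seen.add(value)
--             out.append(value)
--     return out
-- ===== Notes on version B (the rewrite author's own statement) =====
-- stated objective: alternative
-- what changed: A tokenizes each chunk with three nested passes (replace '\r'->'\n', split on '\n', then split each line on ','); B tokenizes in a single character-level scan with an explicit buffer that flushes on any of ',', '\r', '\n', then runs the same strip/skip/dedupe loop over the token stream.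
import Mathlib
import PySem

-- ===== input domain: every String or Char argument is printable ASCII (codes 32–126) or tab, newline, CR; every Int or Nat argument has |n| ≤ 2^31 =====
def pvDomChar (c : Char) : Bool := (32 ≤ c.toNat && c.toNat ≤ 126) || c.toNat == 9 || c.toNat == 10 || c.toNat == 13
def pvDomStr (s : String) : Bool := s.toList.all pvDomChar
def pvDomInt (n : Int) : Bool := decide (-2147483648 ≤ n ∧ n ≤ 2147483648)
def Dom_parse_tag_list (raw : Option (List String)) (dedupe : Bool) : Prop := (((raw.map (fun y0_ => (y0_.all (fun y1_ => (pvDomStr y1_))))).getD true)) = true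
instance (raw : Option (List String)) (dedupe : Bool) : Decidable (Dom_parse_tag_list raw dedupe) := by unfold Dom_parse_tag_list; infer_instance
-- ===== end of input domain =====

-- B replaces A's nested replace/split("\n")/split(",") tokenization by a single
-- character-level scan per chunk (one pass, an explicit buffer); the per-token
-- processing (strip / skip empty / optional dedupe) is verbatim identical in the
-- two Pythons and is therefore ported once, as pvEmit, used by both ports.

-- ===== PORT A =====
-- _chunks(raw): raw is Option (List String); str(x) on a str is x itself
def pvChunks (raw : Option (List String)) : List String :=
  match raw with
  | none => []
  | some xs => xs.map (fun x => x)

-- the shared per-token loop body (identical source text in Source A and Source B)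
def pvEmit (dedupe : Bool) (st : List String × PySem.Set String) (token : String) :
    List String × PySem.Set String :=
  let value := PySem.Str.strip token
  if value = "" then st
  else if dedupe then
    if PySem.Set.contains st.2 value then st
    else (st.1 ++ [value], PySem.Set.add st.2 value)
  else (st.1 ++ [value], st.2)

def parse_tag_list (raw : Option (List String)) (dedupe : Bool) : List String :=
  ((pvChunks raw).foldl
    (fun st chunk =>
      -- for line in chunk.replace("\r", "\n").split("\n"):
      (((PySem.Chars.splitOn (PySem.Str.replace chunk "\r" "\n").toList "\n".toList).map
          String.ofList).foldl
        (fun st line =>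
          -- for token in line.split(","):
          (((PySem.Chars.splitOn line.toList ",".toList).map String.ofList).foldl
            (fun st token => pvEmit dedupe st token) st))
        st))
    ([], PySem.Set.empty)).1

-- ===== PORT B =====
-- _tokens(chunk): one scan over the characters with an explicit buffer
def pvTokens (chunk : String) : List String :=
  let st := chunk.toList.foldl
    (fun (st : List String × List Char) ch =>
      if ch = ',' ∨ ch = '\r' ∨ ch = '\n' then (st.1 ++ [String.ofList st.2], [])
      else (st.1, st.2 ++ [ch]))
    ([], [])
  st.1 ++ [String.ofList st.2]

def parse_tag_list_alt (raw : Option (List String)) (dedupe : Bool) : List String :=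
  ((pvChunks raw).foldl
    (fun st chunk =>
      (pvTokens chunk).foldl (fun st token => pvEmit dedupe st token) st)
    ([], PySem.Set.empty)).1

-- ===== PRECONDITION & SPEC =====
def Spec_parse_tag_list (raw : Option (List String)) (dedupe : Bool) (out : List String) : Prop := out = parse_tag_list_alt raw dedupe
instance (raw : Option (List String)) (dedupe : Bool) (out : List String) : Decidable (Spec_parse_tag_list raw dedupe out) := by unfold Spec_parse_tag_list; infer_instance

-- ===== CLAIM (what is proved, stated in full; the proofs are below) =====
def Claim_equal_parse_tag_list : Prop := ∀ (raw : Option (List String)) (dedupe : Bool), Dom_parse_tag_list raw dedupe → Spec_parse_tag_list raw dedupe (parse_tag_list raw dedupe)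

-- ===== LEMMAS AND PROOFS =====

-- prepend a prefix onto the first piece of a split
def pvGlue (p : List Char) : List (List Char) → List (List Char)
  | [] => [p]
  | t :: ts => (p ++ t) :: ts

-- splitting on a single character, as plain structural recursion
def pvSplitC (d : Char) : List Char → List (List Char)
  | [] => [[]]
  | c :: t => if c = d then [] :: pvSplitC d t else pvGlue [c] (pvSplitC d t)

-- the common token stream: split on ',', '\r' or '\n'
def pvTok : List Char → List (List Char)
  | [] => [[]]
  | c :: t => if c = ',' ∨ c = '\r' ∨ c = '\n' then [] :: pvTok t else pvGlue [c] (pvTok t)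

theorem pvSplitC_ne_nil (d : Char) (l : List Char) : pvSplitC d l ≠ [] := by
  cases l with
  | nil => simp [pvSplitC]
  | cons c t =>
    simp only [pvSplitC]
    split
    · simp
    · cases pvSplitC d t <;> simp [pvGlue]

theorem pvTok_ne_nil (l : List Char) : pvTok l ≠ [] := by
  cases l with
  | nil => simp [pvTok]
  | cons c t =>
    simp only [pvTok]
    split
    · simp
    · cases pvTok t <;> simp [pvGlue]

theorem pvGlue_nil {ts : List (List Char)} (h : ts ≠ []) : pvGlue [] ts = ts := by
  cases ts with
  | nil => exact absurd rfl h
  | cons t ts => simp [pvGlue]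

theorem pvGlue_glue (p q : List Char) (ts : List (List Char)) :
    pvGlue p (pvGlue q ts) = pvGlue (p ++ q) ts := by
  cases ts <;> simp [pvGlue]

theorem pvGlue_append (p : List Char) {xs : List (List Char)} (ys : List (List Char))
    (h : xs ≠ []) : pvGlue p (xs ++ ys) = pvGlue p xs ++ ys := by
  cases xs with
  | nil => exact absurd rfl h
  | cons x xs => simp [pvGlue]

-- str.replace with one-character old/new is a map
theorem pvReplace_go_char (o n : Char) : ∀ (fuel : Nat) (l acc : List Char),
    l.length ≤ fuel →
    PySem.Chars.replace.go [o] [n] fuel l acc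
      = acc.reverse ++ l.map (fun c => if c = o then n else c) := by
  intro fuel
  induction fuel with
  | zero =>
    intro l acc h
    have : l = [] := by cases l <;> simp_all
    subst this
    simp [PySem.Chars.replace.go]
  | succ fuel ih =>
    intro l acc h
    cases l with
    | nil => simp [PySem.Chars.replace.go]
    | cons c t =>
      simp only [PySem.Chars.replace.go, List.isPrefixOf, Bool.and_true]
      simp only [List.length_cons, List.length_nil, Nat.zero_add, List.drop_succ_cons,
        List.drop_zero]
      have ht : t.length ≤ fuel := by simp only [List.length_cons] at h; omega
      by_cases hc : c = o
      · simp only [hc, beq_self_eq_true, if_true]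
        rw [ih t _ ht]
        simp
      · have hb : (o == c) = false := beq_eq_false_iff_ne.mpr (fun e => hc e.symm)
        simp only [hb, Bool.false_eq_true, if_false]
        rw [ih t _ ht]
        simp [hc]

theorem pvReplace_char (o n : Char) (l : List Char) :
    PySem.Chars.replace l [o] [n] = l.map (fun c => if c = o then n else c) := by
  simp [PySem.Chars.replace, pvReplace_go_char o n l.length l [] (le_refl _)]

-- str.split with a one-character separator is pvSplitC
theorem pvSplitOn_go_char (d : Char) : ∀ (fuel : Nat) (l cur : List Char)
    (acc : List (List Char)), l.length < fuel →
    PySem.Chars.splitOn.go [d] fuel l cur acc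
      = acc.reverse ++ pvGlue cur.reverse (pvSplitC d l) := by
  intro fuel
  induction fuel with
  | zero => intro l cur acc h; omega
  | succ fuel ih =>
    intro l cur acc h
    cases l with
    | nil => simp [PySem.Chars.splitOn.go, pvSplitC, pvGlue]
    | cons c t =>
      simp only [PySem.Chars.splitOn.go, List.isPrefixOf, Bool.and_true]
      simp only [List.length_cons, List.length_nil, Nat.zero_add, List.drop_succ_cons,
        List.drop_zero]
      have ht : t.length < fuel := by simp only [List.length_cons] at h; omega
      by_cases hc : c = d
      · have hb : (d == c) = true := by simp [hc]
        simp only [hb, if_true]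
        rw [ih t [] _ ht]
        simp only [pvSplitC, hc, if_true, List.reverse_cons, List.reverse_nil,
          List.append_assoc]
        rw [pvGlue_nil (pvSplitC_ne_nil d t)]
        simp [pvGlue]
      · have hb : (d == c) = false := beq_eq_false_iff_ne.mpr (fun e => hc e.symm)
        simp only [hb, Bool.false_eq_true, if_false]
        rw [ih t (c :: cur) _ ht]
        simp only [pvSplitC, hc, if_false, List.reverse_cons]
        rw [pvGlue_glue]

theorem pvSplitOn_char (d : Char) (l : List Char) :
    PySem.Chars.splitOn l [d] = pvSplitC d l := by
  rw [PySem.Chars.splitOn, pvSplitOn_go_char d (l.length + 1) l [] [] (by omega)]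
  simp [pvGlue_nil (pvSplitC_ne_nil d l)]

-- the nested split of A equals the one-pass token stream
theorem pvFlat_tok (l : List Char) :
    (pvSplitC '\n' (l.map (fun c => if c = '\r' then '\n' else c))).flatMap (pvSplitC ',')
      = pvTok l := by
  induction l with
  | nil => simp [pvSplitC, pvTok]
  | cons c t ih =>
    rw [List.map_cons]
    by_cases hd : c = '\r' ∨ c = '\n'
    · have hmap : (if c = '\r' then '\n' else c) = '\n' := by
        rcases hd with h | h <;> simp [h]
      rw [hmap,
        show pvSplitC '\n' ('\n' :: (t.map (fun c => if c = '\r' then '\n' else c)))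
          = [] :: pvSplitC '\n' (t.map (fun c => if c = '\r' then '\n' else c)) from by
            simp [pvSplitC],
        List.flatMap_cons, ih,
        show pvTok (c :: t) = [] :: pvTok t from by
          simp [pvTok, (by tauto : c = ',' ∨ c = '\r' ∨ c = '\n')]]
      rfl
    · rw [not_or] at hd
      obtain ⟨hr, hn⟩ := hd
      have hmap : (if c = '\r' then '\n' else c) = c := by simp [hr]
      rw [hmap,
        show pvSplitC '\n' (c :: (t.map (fun c => if c = '\r' then '\n' else c)))
          = pvGlue [c] (pvSplitC '\n' (t.map (fun c => if c = '\r' then '\n' else c))) from by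
            simp [pvSplitC, hn]]
      obtain ⟨h, ts, hS⟩ : ∃ h ts,
          pvSplitC '\n' (t.map (fun c => if c = '\r' then '\n' else c)) = h :: ts := by
        cases hS : pvSplitC '\n' (t.map (fun c => if c = '\r' then '\n' else c)) with
        | nil => exact absurd hS (pvSplitC_ne_nil _ _)
        | cons h ts => exact ⟨h, ts, rfl⟩
      have hflat : pvSplitC ',' h ++ ts.flatMap (pvSplitC ',') = pvTok t := by
        rw [← ih, hS, List.flatMap_cons]
      rw [hS]
      simp only [pvGlue, List.singleton_append, List.flatMap_cons]
      by_cases hcm : c = ','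
      · rw [show pvSplitC ',' (c :: h) = [] :: pvSplitC ',' h from by simp [pvSplitC, hcm],
          show pvTok (c :: t) = [] :: pvTok t from by
            simp [pvTok, (by tauto : c = ',' ∨ c = '\r' ∨ c = '\n')],
          ← hflat]
        rfl
      · rw [show pvSplitC ',' (c :: h) = pvGlue [c] (pvSplitC ',' h) from by
            simp [pvSplitC, hcm],
          show pvTok (c :: t) = pvGlue [c] (pvTok t) from by
            simp only [pvTok]
            rw [if_neg (by tauto : ¬(c = ',' ∨ c = '\r' ∨ c = '\n'))],
          ← hflat,
          pvGlue_append [c] (ts.flatMap (pvSplitC ',')) (pvSplitC_ne_nil ',' h)]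

-- B's scan computes the token stream
theorem pvTokens_foldl (cs : List Char) : ∀ (toks : List String) (buf : List Char),
    (let st := cs.foldl
        (fun (st : List String × List Char) ch =>
          if ch = ',' ∨ ch = '\r' ∨ ch = '\n' then (st.1 ++ [String.ofList st.2], [])
          else (st.1, st.2 ++ [ch])) (toks, buf)
     st.1 ++ [String.ofList st.2])
      = toks ++ (pvGlue buf (pvTok cs)).map String.ofList := by
  induction cs with
  | nil => intro toks buf; simp [pvTok, pvGlue]
  | cons c t ih =>
    intro toks buf
    by_cases hc : c = ',' ∨ c = '\r' ∨ c = '\n'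
    · simp only [List.foldl_cons, if_pos hc]
      rw [ih]
      rw [show pvTok (c :: t) = [] :: pvTok t from by simp [pvTok, hc]]
      rw [pvGlue_nil (pvTok_ne_nil t)]
      rw [show pvGlue buf ([] :: pvTok t) = buf :: pvTok t from by simp [pvGlue]]
      simp
    · simp only [List.foldl_cons, if_neg hc]
      rw [ih]
      rw [show pvTok (c :: t) = pvGlue [c] (pvTok t) from by simp [pvTok, hc]]
      rw [pvGlue_glue]

theorem pvTokens_eq (chunk : String) :
    pvTokens chunk = (pvTok chunk.toList).map String.ofList := by
  have := pvTokens_foldl chunk.toList [] []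
  simpa [pvTokens, pvGlue_nil (pvTok_ne_nil chunk.toList)] using this

-- folding over a flatMap is the nested fold
theorem pvFoldl_flatMap {α β γ : Type} (f : γ → β → γ) (g : α → List β)
    (l : List α) (init : γ) :
    (l.flatMap g).foldl f init = l.foldl (fun st x => (g x).foldl f st) init := by
  induction l generalizing init with
  | nil => simp
  | cons x xs ih => simp [List.foldl_append, ih]

-- extensionally equal fold functions fold alike
theorem pvFoldl_ext {α β : Type} (f g : β → α → β) (h : ∀ st x, f st x = g st x)
    (l : List α) (init : β) : l.foldl f init = l.foldl g init := by
  induction l generalizing init with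
  | nil => rfl
  | cons x xs ih => simp only [List.foldl_cons, h, ih]

-- per chunk, A's three nested loops produce exactly B's single loop
theorem pvChunk_eq (dedupe : Bool) (st : List String × PySem.Set String) (chunk : String) :
    (((PySem.Chars.splitOn (PySem.Str.replace chunk "\r" "\n").toList "\n".toList).map
        String.ofList).foldl
      (fun st line =>
        (((PySem.Chars.splitOn line.toList ",".toList).map String.ofList).foldl
          (fun st token => pvEmit dedupe st token) st))
      st)
    = (pvTokens chunk).foldl (fun st token => pvEmit dedupe st token) st := by
  have hrep : (PySem.Str.replace chunk "\r" "\n").toList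
      = chunk.toList.map (fun c => if c = '\r' then '\n' else c) := by
    simp [PySem.Str.replace, pvReplace_char]
  rw [hrep, pvTokens_eq, ← pvFlat_tok chunk.toList, List.map_flatMap, pvFoldl_flatMap,
    show ("\n".toList : List Char) = ['\n'] from rfl, pvSplitOn_char, List.foldl_map]
  apply pvFoldl_ext
  intro st line
  rw [String.toList_ofList, show (",".toList : List Char) = [','] from rfl, pvSplitOn_char]

-- ===== VERDICT (by name: the statement is the Claim_ definition above) =====
theorem parse_tag_list_spec : Claim_equal_parse_tag_list := by
  intro raw dedupe _
  unfold Spec_parse_tag_list parse_tag_list parse_tag_list_alt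
  exact congrArg Prod.fst (pvFoldl_ext _ _ (fun st chunk => pvChunk_eq dedupe st chunk) _ _)
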